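-- pv_equiv track=rewrite | github.com/firedancer-io/firedancer | src/wiredancer/py/wd_cocotil.py | gen_blocks_from_msg_str
-- ===== SOURCE A (Python) =====
-- def gen_blocks_from_msg_str(m_str):
--     # message is supposed to be in string format, each character is 1 byte
--     m = "".join(["{:02x}".format(ord(c) if type(c) == 'str' else c) for c in m_str])
--     # process the message as hex-string from now on
--     mlen_c = len(m)
--     # padding (adding msb 1 is compulsory!, irrespective of msg len)
--     # -- granularity here is byte-level, so add "80"
--     m     += "80"
--     plen_c =  1 * 2
--     # size len is 16 bytes (here is a string in hex, so * 2)
--     slen_c = 16 * 2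
--     # current length of block
--     blen_c = mlen_c + plen_c
--     # calculate addition padding length of zeros
--     b1024len_c = (1024//8)*2 # hex format, 2 chars per byte
--     modlen_c   = blen_c % b1024len_c
--     need_space = int((b1024len_c - modlen_c) < slen_c)
--     zlen_c     = (b1024len_c - slen_c) + (need_space * b1024len_c) - modlen_c
--     # add extra zeros
--     for _ in range(zlen_c):
--         m += "0"
--     # append the size (it must be in bits, so divide by 2 to get bytes, then multiply by 8)
--     m += "{:032x}".format(mlen_c//2*8)
--     # generate blocks
--     assert ( len(m) % b1024len_c ) == 0, "!"
--     B = list()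
--     for b_i in range( len(m) // b1024len_c ):
--         b_str = m[b1024len_c*b_i : b1024len_c*(b_i+1)]
--         B.append( int( b_str, 16 ) )
--     return B
-- ===== SOURCE B (Python) =====
-- def gen_blocks_from_msg_str(m_str):
--     # same byte->hex rendering as the original (the type(c)=='str' test is always False)
--     body = "".join(["{:02x}".format(ord(c) if type(c) == 'str' else c) for c in m_str])
--     mlen_c = len(body)
--     # closed-form zero padding: body + "80" + zeros + 32-char length field is a multiple of 256 hex chars
--     zlen_c = (224 - (mlen_c + 2)) % 256
--     m = body + "80" + "0" * zlen_c + "{:032x}".format(mlen_c // 2 * 8)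
--     nblocks = len(m) // 256
--     # one parse of the whole padded string; blocks fall out by shift/mask (MSB block first)
--     big = int(m, 16)
--     mask = (1 << 1024) - 1
--     return [(big >> (1024 * (nblocks - 1 - i))) & mask for i in range(nblocks)]
-- ===== Notes on version B (the rewrite author's own statement) =====
-- stated objective: alternative
-- what changed: B computes the zero-pad count in closed form ((224-(mlen+2)) % 256) instead of the need_space branch plus a one-char-at-a-time append loop, and extracts the 1024-bit blocks by parsing the padded hex string ONCE as a single integer and taking big // 2**(1024*(nblocks-1-i)) % 2**1024, instead of slicing and re-parsing a 256-char substring per block.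
-- outside the precondition, e.g. on gen_blocks_from_msg_str([1, -5]): A raises ValueError, B raises ValueError
import Mathlib
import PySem

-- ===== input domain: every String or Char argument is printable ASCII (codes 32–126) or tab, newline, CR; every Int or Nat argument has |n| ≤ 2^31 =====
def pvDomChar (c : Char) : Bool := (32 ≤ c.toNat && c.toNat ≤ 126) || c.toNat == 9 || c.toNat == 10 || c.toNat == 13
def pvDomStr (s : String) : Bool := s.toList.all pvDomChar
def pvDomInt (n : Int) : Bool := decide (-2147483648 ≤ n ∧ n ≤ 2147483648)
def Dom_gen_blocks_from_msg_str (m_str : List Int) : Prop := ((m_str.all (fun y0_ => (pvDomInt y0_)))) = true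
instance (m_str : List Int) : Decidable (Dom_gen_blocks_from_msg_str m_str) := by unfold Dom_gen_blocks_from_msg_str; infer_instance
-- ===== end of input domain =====

-- B replaces the zero-appending loop by a closed-form pad count and the per-block
-- substring re-parsing by ONE parse of the whole padded string plus arithmetic
-- extraction of the 1024-bit blocks (objective: alternative decomposition).

-- ===== PORT A =====
-- shared rendering/parsing helpers: both Pythons contain the identical
-- '"{:02x}".format(...)' / '"{:032x}".format(...)' / 'int(..., 16)' expressions.

-- hex digit char for a value < 16 (lowercase, as Python's '{:x}')
def hexDigit (n : Nat) : Char := if n < 10 then Char.ofNat (48 + n) else Char.ofNat (87 + n)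
-- lowercase hex digits of n, most significant first (no sign)
def natToHex (n : Nat) : List Char :=
  if _h : n < 16 then [hexDigit n]
  else natToHex (n / 16) ++ [hexDigit (n % 16)]
  decreasing_by exact Nat.div_lt_self (by omega) (by omega)
-- '{:0wx}'.format(v): zero-pad to width w, sign in front (exact for every int v)
def fmtHexW (w : Nat) (v : Int) : List Char :=
  if v < 0 then '-' :: (List.replicate (w - 1 - (natToHex v.natAbs).length) '0' ++ natToHex v.natAbs)
  else List.replicate (w - (natToHex v.toNat).length) '0' ++ natToHex v.toNat
-- value of a hex digit as int(s, 16) accepts it (0-9 / a-f / A-F)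
def hexVal? (c : Char) : Option Nat :=
  if 48 ≤ c.toNat ∧ c.toNat ≤ 57 then some (c.toNat - 48)
  else if 97 ≤ c.toNat ∧ c.toNat ≤ 102 then some (c.toNat - 87)
  else if 65 ≤ c.toNat ∧ c.toNat ≤ 70 then some (c.toNat - 55)
  else none
def hexNatVal? (t : List Char) : Option Nat :=
  if t = [] then none
  else t.foldl (fun acc c => match acc, hexVal? c with
                             | some a, some v => some (16 * a + v)
                             | _, _ => none) (some 0)
-- hand-written port of Python's int(s, 16); exact on '[sign]hexdigits' strings,
-- which are the only strings either program ever feeds it (they are built from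
-- '{:0wx}' output: hex digits with at most one leading '-')
def pyIntHex? (s : List Char) : Option Int :=
  match s with
  | [] => none
  | c :: t =>
    if c = '-' then (hexNatVal? t).map (fun n => -(n : Int))
    else if c = '+' then (hexNatVal? t).map (fun n => (n : Int))
    else (hexNatVal? (c :: t)).map (fun n => (n : Int))


def gen_blocks_from_msg_str (m_str : List Int) : List Int :=
  -- "".join(["{:02x}".format(ord(c) if type(c)=='str' else c) ...]): the type test is always False
  let m := (m_str.map (fun c => fmtHexW 2 c)).flatten
  let mlen_c : Int := m.length
  let m := m ++ ['8', '0']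
  let plen_c : Int := 1 * 2
  let slen_c : Int := 16 * 2
  let blen_c := mlen_c + plen_c
  let b1024len_c : Int := (PySem.Int.floordiv 1024 8) * 2
  let modlen_c := PySem.Int.mod blen_c b1024len_c
  let need_space : Int := if b1024len_c - modlen_c < slen_c then 1 else 0
  let zlen_c := (b1024len_c - slen_c) + need_space * b1024len_c - modlen_c
  let m := (PySem.List.pyRange 0 zlen_c 1).foldl (fun acc _ => acc ++ ['0']) m
  let m := m ++ fmtHexW 32 (PySem.Int.floordiv mlen_c 2 * 8)
  -- 'assert len(m) % b1024len_c == 0' holds on every input Pre_ admits (hdvd in ports_eq below)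
  (PySem.List.pyRange 0 (PySem.Int.floordiv (m.length : Int) b1024len_c) 1).foldl
    (fun B b_i =>
      B ++ [(pyIntHex? (PySem.List.slice m (some (b1024len_c * b_i)) (some (b1024len_c * (b_i + 1))))).getD 0])
    []

-- ===== PORT B =====
def gen_blocks_from_msg_str_alt (m_str : List Int) : List Int :=
  let body := (m_str.map (fun c => fmtHexW 2 c)).flatten
  let mlen_c : Int := body.length
  let zlen_c := PySem.Int.mod (224 - (mlen_c + 2)) 256
  let m := body ++ ['8', '0'] ++ List.replicate zlen_c.toNat '0'
             ++ fmtHexW 32 (PySem.Int.floordiv mlen_c 2 * 8)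
  let nblocks := PySem.Int.floordiv (m.length : Int) 256
  let big := (pyIntHex? m).getD 0
  let mask : Int := ((1 : Int) <<< (1024 : Nat)) - 1
  -- big >> (1024*(nblocks-1-i)): the shift amount is ≥ 0 for every i in range(nblocks)
  (PySem.List.pyRange 0 nblocks 1).map
    (fun i => PySem.Int.band (big >>> (1024 * (nblocks - 1 - i)).toNat) mask)


-- ===== PRECONDITION & SPEC =====
-- Pre_ excludes (a) lists containing a negative int: its '-' sign is embedded in the
-- hex string, so A's int(...,16) raises ValueError — except when the '-' happens to
-- land on a block boundary (e.g. a negative first element), where A returns an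
-- accidental negative block value that no caller could intend and B parses the same
-- string as one signed integer instead; and (b) astronomically long messages
-- (≥ 2^123 elements), whose 128-bit length field overflows its 32 hex digits so that
-- A's alignment assert fails (AssertionError).
def Pre_gen_blocks_from_msg_str (m_str : List Int) : Prop :=
  (∀ c ∈ m_str, 0 ≤ c) ∧ m_str.length < 2 ^ 123
instance (m_str : List Int) : Decidable (Pre_gen_blocks_from_msg_str m_str) := by
  unfold Pre_gen_blocks_from_msg_str; infer_instance

def pvWitness_gen_blocks_from_msg_str : List Int := [104, 105, 33]

def Spec_gen_blocks_from_msg_str (m_str : List Int) (out : List Int) : Prop := out = gen_blocks_from_msg_str_alt m_str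
instance (m_str : List Int) (out : List Int) : Decidable (Spec_gen_blocks_from_msg_str m_str out) := by unfold Spec_gen_blocks_from_msg_str; infer_instance

-- ===== CLAIM (what is proved, stated in full; the proofs are below) =====
def Claim_equal_gen_blocks_from_msg_str : Prop := ∀ (m_str : List Int), Dom_gen_blocks_from_msg_str m_str → Pre_gen_blocks_from_msg_str m_str → Spec_gen_blocks_from_msg_str m_str (gen_blocks_from_msg_str m_str)

-- ===== LEMMAS AND PROOFS =====
-- proof-side
def pvStep (a : Nat) (c : Char) : Nat := 16 * a + (hexVal? c).getD 0
def parseNat (s : List Char) : Nat := s.foldl pvStep 0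
def AllHex (s : List Char) : Prop := ∀ c ∈ s, (hexVal? c).isSome = true

theorem parse_foldl (s : List Char) : ∀ a : Nat, s.foldl pvStep a = a * 16 ^ s.length + parseNat s := by
  induction s with
  | nil => intro a; simp [parseNat]
  | cons c t ih =>
    intro a
    simp only [List.foldl_cons, parseNat] at *
    rw [ih (pvStep a c), ih (pvStep 0 c)]
    simp [pvStep, List.length_cons, pow_succ]
    ring

theorem parse_append (x y : List Char) : parseNat (x ++ y) = parseNat x * 16 ^ y.length + parseNat y := by
  unfold parseNat
  rw [List.foldl_append, parse_foldl y (List.foldl pvStep 0 x)]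
  rfl

theorem hexValD_lt (c : Char) : (hexVal? c).getD 0 < 16 := by
  unfold hexVal?
  split_ifs <;> simp <;> omega

theorem parse_lt (s : List Char) : parseNat s < 16 ^ s.length := by
  induction s using List.reverseRecOn with
  | nil => simp [parseNat]
  | append_singleton t c ih =>
    rw [parse_append]
    have := hexValD_lt c
    simp only [List.length_append, List.length_singleton, pow_succ]
    have : parseNat [c] < 16 := by simpa [parseNat, pvStep] using hexValD_lt c
    nlinarith [ih, this]

theorem hexFold_some (s : List Char) (h : AllHex s) :
    ∀ a : Nat, s.foldl (fun acc c => match acc, hexVal? c with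
                             | some a, some v => some (16 * a + v)
                             | _, _ => none) (some a) = some (s.foldl pvStep a) := by
  induction s with
  | nil => intro a; simp
  | cons c t ih =>
    intro a
    have hc := h c (List.mem_cons_self ..)
    obtain ⟨v, hv⟩ := Option.isSome_iff_exists.mp hc
    have ht : AllHex t := fun d hd => h d (List.mem_cons_of_mem _ hd)
    simp only [List.foldl_cons, hv]
    rw [ih ht (16 * a + v)]
    simp [pvStep, hv]

theorem hexNatVal?_eq (s : List Char) (h : AllHex s) (hne : s ≠ []) :
    hexNatVal? s = some (parseNat s) := by
  unfold hexNatVal?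
  rw [if_neg hne]
  exact hexFold_some s h 0

theorem pyIntHex?_eq (s : List Char) (h : AllHex s) (hne : s ≠ []) :
    pyIntHex? s = some ((parseNat s : Int)) := by
  match s with
  | c :: t =>
    have hc := h c (List.mem_cons_self ..)
    have h1 : c ≠ '-' := by rintro rfl; simp [hexVal?] at hc
    have h2 : c ≠ '+' := by rintro rfl; simp [hexVal?] at hc
    simp only [pyIntHex?, if_neg h1, if_neg h2, hexNatVal?_eq (c :: t) h (by simp)]
    rfl

theorem allHex_append {x y : List Char} (hx : AllHex x) (hy : AllHex y) : AllHex (x ++ y) := by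
  intro c hc
  rcases List.mem_append.mp hc with h | h
  · exact hx c h
  · exact hy c h

theorem allHex_replicate (k : Nat) : AllHex (List.replicate k '0') := by
  intro c hc
  rw [List.eq_of_mem_replicate hc]
  decide

theorem hexVal?_hexDigit {n : Nat} (h : n < 16) : hexVal? (hexDigit n) = some n := by
  interval_cases n <;> decide

theorem allHex_natToHex (n : Nat) : AllHex (natToHex n) := by
  fun_induction natToHex n with
  | case1 n h =>
    intro c hc
    simp only [List.mem_singleton] at hc
    subst hc
    simp [hexVal?_hexDigit h]
  | case2 n h ih =>
    exact allHex_append ih (by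
      intro c hc
      simp only [List.mem_singleton] at hc
      subst hc
      simp [hexVal?_hexDigit (Nat.mod_lt n (by omega))])

theorem length_natToHex_le (n : Nat) : ∀ k, 1 ≤ k → n < 16 ^ k → (natToHex n).length ≤ k := by
  fun_induction natToHex n with
  | case1 n h => intro k h1 _; simpa using h1
  | case2 n h ih =>
    intro k h1 h2
    have hk2 : 2 ≤ k := by
      by_contra hlt
      interval_cases k <;> omega
    have : n / 16 < 16 ^ (k - 1) := by
      have : 16 ^ k = 16 ^ (k - 1) * 16 := by
        rw [← pow_succ]; congr 1; omega
      omega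
    have := ih (k - 1) (by omega) this
    simp only [List.length_append, List.length_singleton]
    omega

theorem allHex_fmt {w : Nat} {v : Int} (hv : 0 ≤ v) : AllHex (fmtHexW w v) := by
  unfold fmtHexW
  rw [if_neg (by omega)]
  exact allHex_append (allHex_replicate _) (allHex_natToHex _)

theorem length_fmt {w : Nat} {v : Int} (hv : 0 ≤ v) (hs : v < 16 ^ w) (hw : 1 ≤ w) :
    (fmtHexW w v).length = w := by
  unfold fmtHexW
  rw [if_neg (by omega)]
  have hd : (natToHex v.toNat).length ≤ w := by
    apply length_natToHex_le _ w hw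
    have : (v.toNat : Int) = v := Int.toNat_of_nonneg hv
    zify
    omega
  simp only [List.length_append, List.length_replicate]
  omega

theorem length_fmt_le {w : Nat} {v : Int} (hv : 0 ≤ v) (hs : v < 16 ^ 8) (hw : w ≤ 8) :
    (fmtHexW w v).length ≤ 8 := by
  unfold fmtHexW
  rw [if_neg (by omega)]
  have hd : (natToHex v.toNat).length ≤ 8 := by
    apply length_natToHex_le _ 8 (by omega)
    zify
    omega
  simp only [List.length_append, List.length_replicate]
  omega

theorem pow16_eq (j : Nat) : (16 : Nat) ^ (256 * j) = 2 ^ (1024 * j) := by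
  have : (16 : Nat) = 2 ^ 4 := by norm_num
  rw [this, ← pow_mul]
  congr 1
  ring

set_option maxRecDepth 4096 in
theorem block_eq (M : List Char) (hhex : AllHex M) (nb : Nat) (hlen : M.length = 256 * nb)
    (k : Nat) (hk : k < nb) :
    (pyIntHex? (PySem.List.slice M (some (256 * (k : Int))) (some (256 * ((k : Int) + 1))))).getD 0
      = PySem.Int.band ((parseNat M : Int) >>> (1024 * ((nb : Int) - 1 - (k : Int))).toNat)
          (((1 : Int) <<< (1024 : Nat)) - 1) := by
  -- the slice is the k-th 256-char chunk
  have hcast1 : (256 * (k : Int)) = ((256 * k : Nat) : Int) := by push_cast; ring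
  have hcast2 : (256 * ((k : Int) + 1)) = ((256 * k + 256 : Nat) : Int) := by push_cast; ring
  rw [hcast1, hcast2, PySem.List.slice_natCast]
  have htake : 256 * k + 256 - 256 * k = 256 := by omega
  rw [htake]
  set x := M.take (256 * k) with hx
  set b := (M.drop (256 * k)).take 256 with hb
  set r := M.drop (256 * k + 256) with hr
  have hM : M = x ++ (b ++ r) := by
    rw [hx, hb, hr, ← List.drop_drop]
    rw [List.take_append_drop, List.take_append_drop]
  have hlx : x.length = 256 * k := by
    rw [hx, List.length_take]; omega
  have hlb : b.length = 256 := by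
    rw [hb, List.length_take, List.length_drop]; omega
  have hlr : r.length = 256 * (nb - 1 - k) := by
    rw [hr, List.length_drop]; omega
  have hhexb : AllHex b := fun c hc => hhex c (by rw [hM]; simp [hc])
  have hbne : b ≠ [] := by
    intro h; rw [h] at hlb; simp at hlb
  rw [pyIntHex?_eq b hhexb hbne]
  -- exponent
  set j := nb - 1 - k with hj
  have hexp : (1024 * ((nb : Int) - 1 - (k : Int))).toNat = 1024 * j := by omega
  rw [hexp]
  -- decompose the parse (in Nat)
  have hPn : parseNat M
      = parseNat x * (2 ^ 1024 * 2 ^ (1024 * j)) + parseNat b * 2 ^ (1024 * j) + parseNat r := by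
    rw [hM, parse_append, parse_append]
    rw [List.length_append, hlb, hlr]
    have h2 : (16:Nat) ^ (256 + 256 * j) = 2 ^ 1024 * 2 ^ (1024 * j) := by
      rw [show 256 + 256 * j = 256 * (j + 1) by ring, pow16_eq,
        show 1024 * (j + 1) = 1024 + 1024 * j by ring, pow_add]
    rw [h2, pow16_eq j]
    ring
  have hprb : parseNat b < 2 ^ 1024 := by
    have := parse_lt b
    rw [hlb] at this
    have h2 : (16:Nat) ^ 256 = 2 ^ 1024 := by
      have := pow16_eq 1; simpa using this
    rwa [h2] at this
  have hprr : parseNat r < 2 ^ (1024 * j) := by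
    have := parse_lt r
    rwa [hlr, pow16_eq j] at this
  have hpos : 0 < 2 ^ (1024 * j) := by positivity
  -- put the Int-level shift and mask into Nat form
  have hshift : ((parseNat M : Int) >>> (1024 * j)) = ((parseNat M >>> (1024 * j) : Nat) : Int) :=
    Int.mem_toNat?.mp rfl
  have hmask1 : (0 : Int) ≤ ((1 : Int) <<< (1024 : Nat)) - 1 := by decide
  have hmasktn : ((((1 : Int) <<< (1024 : Nat)) - 1)).toNat = 2 ^ 1024 - 1 := by decide
  rw [hshift, PySem.Int.band_of_nonneg (by positivity) hmask1, hmasktn, Int.toNat_natCast]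
  rw [Nat.shiftRight_eq_div_pow, Nat.and_two_pow_sub_one_eq_mod]
  -- the Nat computation
  have hdiv : parseNat M / 2 ^ (1024 * j) = parseNat x * 2 ^ 1024 + parseNat b := by
    rw [hPn, show parseNat x * (2 ^ 1024 * 2 ^ (1024 * j)) + parseNat b * 2 ^ (1024 * j) + parseNat r
        = parseNat r + (parseNat x * 2 ^ 1024 + parseNat b) * 2 ^ (1024 * j) by ring]
    rw [Nat.add_mul_div_right _ _ hpos, Nat.div_eq_of_lt hprr, Nat.zero_add]
  rw [hdiv, add_comm, Nat.add_mul_mod_self_right, Nat.mod_eq_of_lt hprb]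
  rfl

set_option maxRecDepth 8192 in
theorem ports_eq (m_str : List Int) (hdom : Dom_gen_blocks_from_msg_str m_str)
    (hpre : Pre_gen_blocks_from_msg_str m_str) :
    gen_blocks_from_msg_str m_str = gen_blocks_from_msg_str_alt m_str := by
  obtain ⟨hnn, hsz⟩ := hpre
  simp only [gen_blocks_from_msg_str, gen_blocks_from_msg_str_alt]
  set body := (List.map (fun c => fmtHexW 2 c) m_str).flatten with hbd
  have hhex : AllHex body := by
    intro c hc
    rw [hbd] at hc
    obtain ⟨l, hl, hcl⟩ := List.mem_flatten.mp hc
    obtain ⟨v, hv, rfl⟩ := List.mem_map.mp hl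
    exact allHex_fmt (hnn v hv) c hcl
  have hblen : body.length ≤ 8 * m_str.length := by
    rw [hbd, List.length_flatten]
    have : ∀ l ∈ (List.map (fun c => fmtHexW 2 c) m_str).map List.length, l ≤ 8 := by
      intro l hl
      simp only [List.map_map, List.mem_map] at hl
      obtain ⟨v, hv, rfl⟩ := hl
      have h1 : 0 ≤ v := hnn v hv
      have h2 : v ≤ 2147483648 := by
        have := List.all_eq_true.mp hdom v hv
        simp [pvDomInt] at this
        omega
      exact length_fmt_le h1 (by omega) (by omega)
    calc ((List.map (fun c => fmtHexW 2 c) m_str).map List.length).sum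
        ≤ ((List.map (fun c => fmtHexW 2 c) m_str).map List.length).length * 8 :=
          List.sum_le_card_nsmul _ 8 this
      _ = 8 * m_str.length := by simp [Nat.mul_comm]
  have h256 : PySem.Int.floordiv 1024 8 * 2 = 256 := by decide
  rw [h256]
  simp only [show ((16:Int) * 2) = 32 from by norm_num, show ((1:Int) * 2) = 2 from by norm_num]
  rw [PySem.List.foldl_append_singleton_eq_map (fun _ => ('0' : Char))]
  simp only [List.map_const', PySem.List.length_pyRange_one, sub_zero]
  have hzz : (256 - 32 +
      (if 256 - PySem.Int.mod ((body.length : Int) + 2) 256 < 32 then (1:Int) else 0) * 256 -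
      PySem.Int.mod ((body.length : Int) + 2) 256)
      = PySem.Int.mod (224 - ((body.length : Int) + 2)) 256 := by
    rw [PySem.Int.mod_eq_emod_of_pos (by norm_num), PySem.Int.mod_eq_emod_of_pos (by norm_num)]
    have h1 := Int.emod_nonneg ((body.length : Int) + 2) (by norm_num : (256:Int) ≠ 0)
    have h2 := Int.emod_lt_of_pos ((body.length : Int) + 2) (by norm_num : (0:Int) < 256)
    split_ifs with h <;> omega
  rw [hzz]
  simp only [List.append_assoc]
  set z := PySem.Int.mod (224 - ((body.length : Int) + 2)) 256 with hzdef
  set F := fmtHexW 32 (PySem.Int.floordiv (body.length : Int) 2 * 8) with hFdef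
  set M := body ++ (['8', '0'] ++ (List.replicate z.toNat '0' ++ F)) with hMdef
  -- basic facts about z, F, M
  have hz0 : 0 ≤ z := PySem.Int.mod_nonneg _ (by norm_num)
  have hz256 : z < 256 := PySem.Int.mod_lt _ (by norm_num)
  have hFlen : F.length = 32 := by
    rw [hFdef]
    have hfd : PySem.Int.floordiv ((body.length : Int)) 2 = (body.length : Int) / 2 :=
      PySem.Int.floordiv_eq_ediv_of_pos (by norm_num)
    apply length_fmt
    · rw [hfd]; positivity
    · rw [hfd]
      have h1 : (body.length : Int) < 2 ^ 126 := by
        have : (m_str.length : Int) < 2 ^ 123 := by exact_mod_cast hsz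
        have : (body.length : Int) ≤ 8 * (m_str.length : Int) := by exact_mod_cast hblen
        omega
      have : ((16:Int) ^ 32) = 2 ^ 128 := by norm_num
      rw [this]
      omega
    · norm_num
  have hMlen : M.length = body.length + 2 + z.toNat + 32 := by
    rw [hMdef]
    simp [hFlen]
    omega
  have hdvd : M.length % 256 = 0 := by
    rw [hMlen, hzdef]
    have h1 := Int.emod_nonneg (224 - ((body.length : Int) + 2)) (by norm_num : (256:Int) ≠ 0)
    have h2 := Int.emod_lt_of_pos (224 - ((body.length : Int) + 2)) (by norm_num : (0:Int) < 256)
    rw [PySem.Int.mod_eq_emod_of_pos (by norm_num)]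
    omega
  have hhexM : AllHex M := by
    rw [hMdef]
    refine allHex_append hhex (allHex_append ?_ (allHex_append (allHex_replicate _) ?_))
    · intro c hc
      rw [List.mem_cons, List.mem_singleton] at hc
      rcases hc with rfl | rfl <;> decide
    · rw [hFdef]
      apply allHex_fmt
      have := PySem.Int.floordiv_eq_ediv_of_pos (a := (body.length : Int)) (by norm_num : (0:Int) < 2)
      rw [this]
      positivity
  have hMne : M ≠ [] := by
    intro h
    have := congrArg List.length h
    rw [hMlen] at this
    simp at this
  set nb := M.length / 256 with hnbdef
  have hnb : M.length = 256 * nb := by omega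
  have hnb1 : 1 ≤ nb := by omega
  have hcount : PySem.Int.floordiv ((M.length : Int)) 256 = (nb : Int) := by
    rw [PySem.Int.floordiv_eq_ediv_of_pos (by norm_num)]
    omega
  rw [hcount]
  rw [pyIntHex?_eq M hhexM hMne]
  simp only [Option.getD_some]
  rw [PySem.List.foldl_append_singleton_eq_map
    (fun b_i => (pyIntHex? (PySem.List.slice M (some (256 * b_i)) (some (256 * (b_i + 1))))).getD 0)]
  rw [List.nil_append]
  apply List.map_congr_left
  intro i hi
  rw [PySem.List.mem_pyRange_one] at hi
  obtain ⟨hi0, hilt⟩ := hi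
  have hik : i = ((i.toNat : Nat) : Int) := (Int.toNat_of_nonneg hi0).symm
  have hklt : i.toNat < nb := by omega
  rw [hik]
  exact block_eq M hhexM nb hnb i.toNat hklt

-- ===== VERDICT (by name: the statement is the Claim_ definition above) =====
theorem gen_blocks_from_msg_str_spec : Claim_equal_gen_blocks_from_msg_str := by
  intro m_str hdom hpre
  unfold Spec_gen_blocks_from_msg_str
  exact ports_eq m_str hdom hpre
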